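-- pv_equiv track=rewrite | github.com/luomantiker/hb_aitc_j6_3031 | whls_extract/hbdk4_compiler-4.1.17.data/purelib/hbdk4/compiler/tools/perf.py | make_html_table
-- ===== SOURCE A (Python) =====
-- from typing import Iterable, List, Tuple, Union, Dict, Optional
--
-- def make_html_table(table: List[Iterable[str]], merge_column: bool):
--     """helper function to make an html table.  table[i] is a row"""
--     for row_id, row in enumerate(table):
--         cells = []  # each cell contains html element (th, td)
--         format_str = (
--             "<th%s>\n      %s\n    </th>"
--             if row_id == 0
--             else "<td%s>\n      %s\n    </td>"
--         )
--
--         if merge_column: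
--             col_id = 0
--             while col_id < len(row):
--                 cell = row[col_id]
--                 col_id_of_different_content = col_id + 1
--                 while (
--                     col_id_of_different_content < len(row)
--                     and cell == row[col_id_of_different_content]
--                 ):
--                     col_id_of_different_content += 1
--                 if col_id_of_different_content == col_id + 1:  # only one cell
--                     cells.append(format_str % ("", cell))
--                 else:
--                     cells.append(
--                         format_str
--                         % (" colspan=%d" % (col_id_of_different_content - col_id), cell)
--                     )
--                 col_id = col_id_of_different_content
--         else:
--             cells = [format_str % ("", cell) for cell in row]
--
--         table[row_id] = "\n    ".join(cells)
--
--     s = "\n  ".join("<tr>\n    %s\n  </tr>" % row for row in table)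
--
--     return "\n<table>\n  %s\n</table>\n" % s
-- ===== SOURCE B (Python) =====
-- def make_html_table(table, merge_column):
--     """helper function to make an html table.  table[i] is a row.
--
--     Unlike the original, this does not mutate `table`; return value is identical.
--     Runs of equal cells are found in one backward pass building a run-length
--     list by head update, instead of a nested index-scanning while loop."""
--     rows_html = []
--     for row_id, row in enumerate(table):
--         format_str = (
--             "<th%s>\n      %s\n    </th>"
--             if row_id == 0
--             else "<td%s>\n      %s\n    </td>"
--         )
--         row = list(row)
--         if merge_column:
--             runs = []
--             for c in reversed(row):
--                 if runs and runs[0][0] == c: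
--                     runs[0] = (runs[0][0], runs[0][1] + 1)
--                 else:
--                     runs[0:0] = [(c, 1)]
--             cells = [
--                 format_str % ("" if n == 1 else " colspan=%d" % n, c)
--                 for c, n in runs
--             ]
--         else:
--             cells = [format_str % ("", cell) for cell in row]
--         rows_html.append("<tr>\n    %s\n  </tr>" % "\n    ".join(cells))
--     return "\n<table>\n  %s\n</table>\n" % "\n  ".join(rows_html)
-- ===== Notes on version B (the rewrite author's own statement) =====
-- stated objective: alternative
-- what changed: The merge branch's nested index-based while loops (outer position scan + inner run scan) are replaced by a single backward pass over the row that builds a run-length list ((cell, count) pairs) by updating its front, then a comprehension formats each run; B also does not mutate the caller's table list (return value identical).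
import Mathlib
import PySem

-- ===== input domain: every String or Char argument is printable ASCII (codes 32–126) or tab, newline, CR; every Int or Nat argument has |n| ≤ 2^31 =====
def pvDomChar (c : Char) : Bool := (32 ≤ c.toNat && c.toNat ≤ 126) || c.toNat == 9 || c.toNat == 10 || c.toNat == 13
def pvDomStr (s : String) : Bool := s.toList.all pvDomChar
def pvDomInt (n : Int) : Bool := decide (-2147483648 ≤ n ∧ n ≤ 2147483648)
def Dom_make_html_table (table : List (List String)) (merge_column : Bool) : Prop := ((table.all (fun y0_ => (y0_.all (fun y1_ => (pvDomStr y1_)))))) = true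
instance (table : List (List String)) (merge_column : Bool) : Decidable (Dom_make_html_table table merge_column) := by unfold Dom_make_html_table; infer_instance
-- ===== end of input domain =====

-- B replaces A's nested index-scanning while loop by a single backward pass building a
-- run-length list (objective: alternative/idiomatic decomposition; same return value).
-- A mutates its `table` argument in place (rows are replaced by strings); B does not:
-- the equivalence proved here is about the RETURN value only.

-- ===== PORT A =====
-- the chosen format string applied to (attr, cell); used by both Pythons verbatim
def pvFmt (isHead : Bool) (attr cell : String) : String :=
  if isHead then "<th" ++ attr ++ ">\n      " ++ cell ++ "\n    </th>"
  else "<td" ++ attr ++ ">\n      " ++ cell ++ "\n    </td>"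

-- inner `while` of A: first index ≥ j whose cell differs from `cell` (or len)
def pvScanA (row : List String) (cell : String) (j : Nat) : Nat :=
  if h : j < row.length ∧ row.getD j "" == cell then pvScanA row cell (j + 1) else j
termination_by row.length - j
decreasing_by omega

-- needed by pvMergeA's termination
theorem pvScanA_le (row : List String) (cell : String) (j : Nat) : j ≤ pvScanA row cell j := by
  unfold pvScanA
  split
  · rename_i h
    have ih := pvScanA_le row cell (j + 1)
    omega
  · exact Nat.le_refl j
termination_by row.length - j
decreasing_by omega

-- outer `while col_id < len(row)` of A's merge branch
def pvMergeA (row : List String) (isHead : Bool) (i : Nat) : List String :=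
  if h : i < row.length then
    let cell := row.getD i ""
    let j := pvScanA row cell (i + 1)
    (if j = i + 1 then pvFmt isHead "" cell
     else pvFmt isHead (" colspan=" ++ PySem.Int.toStr ((j - i : Nat) : Int)) cell)
      :: pvMergeA row isHead j
  else []
termination_by row.length - i
decreasing_by
  have := pvScanA_le row (row.getD i "") (i + 1)
  omega

def make_html_table (table : List (List String)) (merge_column : Bool) : String :=
  let rows := (PySem.List.enumerate table 0).map (fun p =>
    let cells :=
      if merge_column then pvMergeA p.2 (p.1 == 0) 0
      else p.2.map (fun cell => pvFmt (p.1 == 0) "" cell)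
    PySem.Str.join "\n    " cells)
  "\n<table>\n  " ++
    PySem.Str.join "\n  " (rows.map (fun row => "<tr>\n    " ++ row ++ "\n  </tr>")) ++
    "\n</table>\n"

-- ===== PORT B =====
-- B's loop body: update the front run or prepend a fresh one
def pvStep (runs : List (String × Nat)) (c : String) : List (String × Nat) :=
  match runs with
  | (c', n) :: rs => if c' == c then (c', n + 1) :: rs else (c, 1) :: (c', n) :: rs
  | [] => [(c, 1)]

-- B's cell comprehension body
def pvCellB (isHead : Bool) (q : String × Nat) : String :=
  pvFmt isHead (if q.2 = 1 then "" else " colspan=" ++ PySem.Int.toStr ((q.2 : Nat) : Int)) q.1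

def make_html_table_alt (table : List (List String)) (merge_column : Bool) : String :=
  let rows := (PySem.List.enumerate table 0).map (fun p =>
    let cells :=
      if merge_column then (p.2.reverse.foldl pvStep []).map (pvCellB (p.1 == 0))
      else p.2.map (fun cell => pvFmt (p.1 == 0) "" cell)
    "<tr>\n    " ++ PySem.Str.join "\n    " cells ++ "\n  </tr>")
  "\n<table>\n  " ++ PySem.Str.join "\n  " rows ++ "\n</table>\n"

-- ===== PRECONDITION & SPEC =====
def Spec_make_html_table (table : List (List String)) (merge_column : Bool) (out : String) : Prop := out = make_html_table_alt table merge_column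
instance (table : List (List String)) (merge_column : Bool) (out : String) : Decidable (Spec_make_html_table table merge_column out) := by unfold Spec_make_html_table; infer_instance

-- ===== CLAIM (what is proved, stated in full; the proofs are below) =====
def Claim_equal_make_html_table : Prop := ∀ (table : List (List String)) (merge_column : Bool), Dom_make_html_table table merge_column → Spec_make_html_table table merge_column (make_html_table table merge_column)

-- ===== LEMMAS AND PROOFS =====

-- pvScanA stops at j + (length of the run of `cell` from j), and drops exactly that run
theorem pvScanA_spec (row : List String) (cell : String) (j : Nat) :
    pvScanA row cell j = j + ((row.drop j).takeWhile (· == cell)).length ∧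
      row.drop (pvScanA row cell j) = (row.drop j).dropWhile (· == cell) := by
  unfold pvScanA
  split
  · rename_i h
    obtain ⟨ih1, ih2⟩ := pvScanA_spec row cell (j + 1)
    have hd : row.drop j = row[j] :: row.drop (j + 1) := List.drop_eq_getElem_cons h.1
    have hg : row.getD j "" = row[j] := List.getD_eq_getElem row "" h.1
    have hc : (row[j] == cell) = true := by rw [← hg]; exact h.2
    rw [hd]
    simp only [List.takeWhile_cons, List.dropWhile_cons, hc, if_true, List.length_cons]
    exact ⟨by omega, ih2⟩
  · rename_i h
    by_cases hl : j < row.length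
    · have hc : (row.getD j "" == cell) = false := by
        cases hb : (row.getD j "" == cell) with
        | true => exact absurd ⟨hl, hb⟩ h
        | false => rfl
      have hd : row.drop j = row[j] :: row.drop (j + 1) := List.drop_eq_getElem_cons hl
      have hg : row.getD j "" = row[j] := List.getD_eq_getElem row "" hl
      have hc' : (row[j] == cell) = false := by rw [← hg]; exact hc
      constructor
      · rw [hd]
        simp only [List.takeWhile_cons, hc']
        simp
      · conv_rhs => rw [hd]
        simp only [List.dropWhile_cons, hc']
        simp [← hd]
    · have hnil : row.drop j = [] := List.drop_eq_nil_of_le (by omega)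
      simp [hnil]
termination_by row.length - j
decreasing_by omega

-- reducing pvStep on a literal list shape (unfolds the match; proofs never open pvStep otherwise)
theorem pvStep_cons (c' : String) (n : Nat) (rs : List (String × Nat)) (c : String) :
    pvStep ((c', n) :: rs) c = if c' == c then (c', n + 1) :: rs else (c, 1) :: (c', n) :: rs := rfl

-- B's backward pass groups a list into runs: head characterization
theorem pvRuns_cons (c : String) (rest : List String) :
    (c :: rest).foldr (fun x acc => pvStep acc x) [] =
      (c, 1 + (rest.takeWhile (· == c)).length) ::
        (rest.dropWhile (· == c)).foldr (fun x acc => pvStep acc x) [] := by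
  induction rest generalizing c with
  | nil => simp [pvStep]
  | cons d rest' ih =>
    have lhs : (c :: d :: rest').foldr (fun x acc => pvStep acc x) [] =
        pvStep ((d :: rest').foldr (fun x acc => pvStep acc x) []) c := rfl
    rw [lhs, ih d, pvStep_cons]
    by_cases hdc : d = c
    · subst hdc
      simp only [beq_self_eq_true, if_true, List.takeWhile_cons, List.dropWhile_cons,
        List.length_cons, Nat.add_assoc]
    · have hb : (d == c) = false := beq_false_of_ne hdc
      simp only [hb, Bool.false_eq_true, if_false, List.takeWhile_cons, List.dropWhile_cons,
        List.length_nil]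
      rw [ih d]

-- the two run scanners produce the same cells
theorem pvMerge_eq (row : List String) (isHead : Bool) (i : Nat) :
    pvMergeA row isHead i =
      ((row.drop i).foldr (fun x acc => pvStep acc x) []).map (pvCellB isHead) := by
  unfold pvMergeA
  split
  · rename_i h
    have hg : row.getD i "" = row[i] := List.getD_eq_getElem row "" h
    have hd : row.drop i = row[i] :: row.drop (i + 1) := List.drop_eq_getElem_cons h
    have hle := pvScanA_le row (row.getD i "") (i + 1)
    have ih := pvMerge_eq row isHead (pvScanA row (row.getD i "") (i + 1))
    obtain ⟨hs1, hs2⟩ := pvScanA_spec row (row.getD i "") (i + 1)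
    rw [hg] at hs1 hs2 hle ih ⊢
    rw [hd, pvRuns_cons, List.map_cons, ← hs2, ← ih]
    simp only [pvCellB]
    by_cases h1 : pvScanA row row[i] (i + 1) = i + 1
    · rw [if_pos h1, if_pos (by omega : 1 + ((row.drop (i + 1)).takeWhile (· == row[i])).length = 1)]
    · rw [if_neg h1, if_neg (by omega : ¬ 1 + ((row.drop (i + 1)).takeWhile (· == row[i])).length = 1)]
      rw [show pvScanA row row[i] (i + 1) - i
            = 1 + ((row.drop (i + 1)).takeWhile (· == row[i])).length from by omega]
  · rename_i h
    have hnil : row.drop i = [] := List.drop_eq_nil_of_le (by omega)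
    simp [hnil]
termination_by row.length - i
decreasing_by
  have := pvScanA_le row (row.getD i "") (i + 1)
  omega

-- per-row equality, both branches
theorem pvRow_eq (merge_column : Bool) (p : Int × List String) :
    "<tr>\n    " ++
        PySem.Str.join "\n    "
          (if merge_column then pvMergeA p.2 (p.1 == 0) 0
           else p.2.map (fun cell => pvFmt (p.1 == 0) "" cell)) ++ "\n  </tr>" =
      "<tr>\n    " ++
        PySem.Str.join "\n    "
          (if merge_column then (p.2.reverse.foldl pvStep []).map (pvCellB (p.1 == 0))
           else p.2.map (fun cell => pvFmt (p.1 == 0) "" cell)) ++ "\n  </tr>" := by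
  cases merge_column with
  | false => rfl
  | true =>
    simp only [if_true]
    have hm := pvMerge_eq p.2 (p.1 == 0) 0
    rw [List.drop_zero] at hm
    rw [hm, List.foldl_reverse]

-- ===== VERDICT (by name: the statement is the Claim_ definition above) =====
theorem make_html_table_spec : Claim_equal_make_html_table := by
  intro table merge_column _
  unfold Spec_make_html_table make_html_table make_html_table_alt
  simp only [List.map_map]
  refine congrArg (fun s => "\n<table>\n  " ++ PySem.Str.join "\n  " s ++ "\n</table>\n") ?_
  exact List.map_congr_left (fun p _ => pvRow_eq merge_column p)
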